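-- pv_equiv track=rewrite | github.com/ymtz13/CompetitiveProgramming | AtCoder/ARC122/C.py | solve
-- ===== SOURCE A (Python) =====
-- def solve(n):
--   count = 0
--   x = 1
--   y = 0
--   while 2*x+y<=n:
--     y += x
--     x += y
--     count += 1
--
--   return x, n-x, count
-- ===== SOURCE B (Python) =====
-- def _fib(m):
--     # fast doubling: returns (F(m), F(m+1))
--     if m == 0:
--         return (0, 1)
--     a, b = _fib(m // 2)
--     c = a * (2 * b - a)
--     d = a * a + b * b
--     return (d, c + d) if m % 2 else (c, d)
--
--
-- def _x(k):
--     # k-th odd-indexed Fibonacci number 1, 2, 5, 13, ... = F(2k+1)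
--     return _fib(2 * k + 1)[0]
--
--
-- def solve(n):
--     if n < 2:
--         return (1, n - 1, 0)
--     hi = 1
--     while _x(hi) <= n:
--         hi *= 2
--     lo = 0  # invariant: _x(lo) <= n < _x(hi)
--     while hi - lo > 1:
--         mid = (lo + hi) // 2
--         if _x(mid) <= n:
--             lo = mid
--         else:
--             hi = mid
--     x = _x(lo)
--     return (x, n - x, lo)
-- ===== Notes on version B (the rewrite author's own statement) =====
-- stated objective: alternative
-- what changed: B computes nothing by accumulating: it gets the k-th candidate value as the odd-indexed Fibonacci number F(2k+1) via a recursive fast-doubling helper, finds an upper index by exponential doubling and then binary-searches for the largest index k with F(2k+1) <= n, returning (F(2k+1), n-F(2k+1), k).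
import Mathlib
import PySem

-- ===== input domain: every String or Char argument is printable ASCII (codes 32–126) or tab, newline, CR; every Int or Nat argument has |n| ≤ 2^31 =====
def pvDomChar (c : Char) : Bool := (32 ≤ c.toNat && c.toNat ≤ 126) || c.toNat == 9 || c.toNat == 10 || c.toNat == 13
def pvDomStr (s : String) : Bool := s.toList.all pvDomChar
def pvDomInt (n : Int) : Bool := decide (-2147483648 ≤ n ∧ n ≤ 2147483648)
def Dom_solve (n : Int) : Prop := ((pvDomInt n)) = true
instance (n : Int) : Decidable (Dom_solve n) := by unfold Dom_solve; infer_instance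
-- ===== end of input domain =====

-- B replaces A's accumulator loop by a different algorithm: a fast-doubling
-- Fibonacci helper plus an exponential-then-binary search for the answer index
-- (objective: alternative; not claimed faster).

-- ===== PORT A =====
-- the while loop of A; fuel only makes the recursion total (never exhausted for the run)
def solveLoop (n : Int) : Nat → Int → Int → Int → Int × Int × Int
  | 0, x, y, count => (x, y, count)
  | Nat.succ f, x, y, count =>
    if 2 * x + y ≤ n then
      solveLoop n f (x + (y + x)) (y + x) (count + 1)
    else (x, y, count)

def solve (n : Int) : Int × Int × Int :=
  let s := solveLoop n (n.toNat + 2) 1 0 0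
  (s.1, n - s.1, s.2.2)

-- ===== PORT B =====
-- fast doubling: fdN m = (F(m), F(m+1)); recursion on m/2 as in Source B's _fib
def fdN (m : Nat) : Int × Int :=
  if h : m = 0 then (0, 1)
  else
    let p := fdN (m / 2)
    let a := p.1
    let b := p.2
    let c := a * (2 * b - a)
    let d := a * a + b * b
    if m % 2 = 0 then (c, d) else (d, c + d)
termination_by m
decreasing_by exact Nat.div_lt_self (Nat.pos_of_ne_zero h) one_lt_two

-- Source B's _x
def xk (k : Nat) : Int := (fdN (2 * k + 1)).1

-- Source B's first while loop (doubling); fuel never exhausted for the run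
def dblLoop (n : Int) : Nat → Nat → Nat
  | 0, hi => hi
  | Nat.succ f, hi => if xk hi ≤ n then dblLoop n f (hi * 2) else hi

-- Source B's second while loop (binary search); fuel never exhausted for the run
def bsLoop (n : Int) : Nat → Nat → Nat → Nat
  | 0, lo, _ => lo
  | Nat.succ f, lo, hi =>
    if hi - lo > 1 then
      let mid := (lo + hi) / 2
      if xk mid ≤ n then bsLoop n f mid hi else bsLoop n f lo mid
    else lo

def solve_alt (n : Int) : Int × Int × Int :=
  if n < 2 then (1, n - 1, 0)
  else
    let hi := dblLoop n (n.toNat + 2) 1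
    let lo := bsLoop n (n.toNat + 2) 0 hi
    (xk lo, n - xk lo, (lo : Int))

-- ===== PRECONDITION & SPEC =====
def Spec_solve (n : Int) (out : Int × Int × Int) : Prop := out = solve_alt n
instance (n : Int) (out : Int × Int × Int) : Decidable (Spec_solve n out) := by unfold Spec_solve; infer_instance

-- ===== CLAIM (what is proved, stated in full; the proofs are below) =====
def Claim_equal_solve : Prop := ∀ (n : Int), Dom_solve n → Spec_solve n (solve n)

-- ===== LEMMAS AND PROOFS =====

-- the odd-indexed Fibonacci numbers, as integers
def gF (k : Nat) : Int := (Nat.fib (2 * k + 1) : Int)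

theorem fdN_eq (m : Nat) : fdN m = ((Nat.fib m : Int), (Nat.fib (m + 1) : Int)) := by
  induction m using Nat.strong_induction_on with
  | _ m ih =>
    rw [fdN]
    by_cases h : m = 0
    · simp [h]
    · have hlt : m / 2 < m := Nat.div_lt_self (Nat.pos_of_ne_zero h) one_lt_two
      simp only [h, dif_neg, not_false_iff]
      rw [ih (m / 2) hlt]
      have hle : Nat.fib (m / 2) ≤ 2 * Nat.fib (m / 2 + 1) := by
        have := Nat.fib_le_fib_succ (n := m / 2)
        omega
      have hc : (Nat.fib (m / 2) : Int) * (2 * (Nat.fib (m / 2 + 1) : Int) - (Nat.fib (m / 2) : Int))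
          = (Nat.fib (2 * (m / 2)) : Int) := by
        rw [Nat.fib_two_mul]
        push_cast [hle]
        ring
      have hd : (Nat.fib (m / 2) : Int) * (Nat.fib (m / 2) : Int)
          + (Nat.fib (m / 2 + 1) : Int) * (Nat.fib (m / 2 + 1) : Int)
          = (Nat.fib (2 * (m / 2) + 1) : Int) := by
        rw [Nat.fib_two_mul_add_one]
        push_cast
        ring
      by_cases hp : m % 2 = 0
      · have hm : 2 * (m / 2) = m := by omega
        simp only [hp, if_pos]
        rw [hc, hd, hm]
      · have hm : 2 * (m / 2) + 1 = m := by omega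
        simp only [hp, if_neg, not_false_iff]
        rw [hc, hd, hm]
        have hfib : Nat.fib (m + 1) = Nat.fib (2 * (m / 2)) + Nat.fib m := by
          have h2 : m + 1 = 2 * (m / 2) + 2 := by omega
          rw [h2, Nat.fib_add_two, hm]
        have hfibI : (Nat.fib (m + 1) : Int) = (Nat.fib (2 * (m / 2)) : Int) + (Nat.fib m : Int) := by
          exact_mod_cast hfib
        rw [hfibI]

theorem xk_eq (k : Nat) : xk k = gF k := by
  simp [xk, fdN_eq, gF]

theorem gF_lt (k : Nat) : gF k < gF (k + 1) := by
  unfold gF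
  have h1 : Nat.fib (2 * (k + 1) + 1) = Nat.fib (2 * k + 1) + Nat.fib (2 * k + 2) := by
    have : 2 * (k + 1) + 1 = (2 * k + 1) + 2 := by omega
    rw [this, Nat.fib_add_two]
  have h2 : 0 < Nat.fib (2 * k + 2) := Nat.fib_pos.mpr (by omega)
  have : Nat.fib (2 * k + 1) < Nat.fib (2 * (k + 1) + 1) := by omega
  exact_mod_cast this

theorem gF_mono {k l : Nat} (h : k ≤ l) : gF k ≤ gF l := by
  unfold gF
  exact_mod_cast Nat.fib_mono (by omega)

theorem gF_ge (k : Nat) : (k : Int) + 1 ≤ gF k := by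
  induction k with
  | zero => simp [gF]
  | succ k ih =>
    have := gF_lt k
    push_cast
    omega

theorem A_loop (n : Int) : ∀ (f c : Nat), n < gF (c + f) →
    ∃ k, c ≤ k ∧
      solveLoop n f (gF c) ((Nat.fib (2 * c) : Int)) (c : Int)
        = (gF k, (Nat.fib (2 * k) : Int), (k : Int)) ∧
      n < gF (k + 1) ∧ (k = c ∨ gF k ≤ n) := by
  intro f
  induction f with
  | zero =>
    intro c hc
    refine ⟨c, le_refl _, rfl, ?_, Or.inl rfl⟩
    calc n < gF (c + 0) := hc
      _ ≤ gF (c + 1) := gF_mono (by omega)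
  | succ f ih =>
    intro c hc
    have hfib2 : Nat.fib (2 * c + 2) = Nat.fib (2 * c) + Nat.fib (2 * c + 1) := by
      exact Nat.fib_add_two
    have hfib3 : Nat.fib (2 * c + 3) = Nat.fib (2 * c + 1) + Nat.fib (2 * c + 2) := by
      have : 2 * c + 3 = (2 * c + 1) + 2 := by omega
      rw [this, Nat.fib_add_two]
    have hguard : 2 * gF c + (Nat.fib (2 * c) : Int) = gF (c + 1) := by
      unfold gF
      have : 2 * (c + 1) + 1 = 2 * c + 3 := by omega
      rw [this]
      push_cast [hfib3, hfib2]
      ring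
    simp only [solveLoop]
    by_cases hg : 2 * gF c + (Nat.fib (2 * c) : Int) ≤ n
    · simp only [hg, if_pos]
      have hy : (Nat.fib (2 * c) : Int) + gF c = (Nat.fib (2 * (c + 1)) : Int) := by
        unfold gF
        have : 2 * (c + 1) = 2 * c + 2 := by omega
        rw [this]
        push_cast [hfib2]
        ring
      have hx : gF c + ((Nat.fib (2 * c) : Int) + gF c) = gF (c + 1) := by
        rw [← hguard]; ring
      have hcnt : (c : Int) + 1 = ((c + 1 : Nat) : Int) := by push_cast; ring
      rw [hx, hy, hcnt]
      have hrec : n < gF ((c + 1) + f) := by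
        have : (c + 1) + f = c + (f + 1) := by omega
        rw [this]; exact hc
      obtain ⟨k, hk1, hk2, hk3, hk4⟩ := ih (c + 1) hrec
      refine ⟨k, by omega, hk2, hk3, ?_⟩
      rcases hk4 with h | h
      · right; rw [h, ← hguard]; exact hg
      · right; exact h
    · simp only [hg, if_neg, not_false_iff]
      refine ⟨c, le_refl _, rfl, ?_, Or.inl rfl⟩
      rw [← hguard]
      omega

theorem A_char (n : Int) :
    ∃ k, solve n = (gF k, n - gF k, (k : Int)) ∧ n < gF (k + 1) ∧ (k = 0 ∨ gF k ≤ n) := by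
  have hfuel : n < gF (0 + (n.toNat + 2)) := by
    have h1 := gF_ge (0 + (n.toNat + 2))
    have h2 : n ≤ (n.toNat : Int) := Int.self_le_toNat n
    push_cast at h1
    omega
  have h1 : gF 0 = 1 := by decide
  have h0 : (Nat.fib (2 * 0) : Int) = 0 := by decide
  obtain ⟨k, _, hk2, hk3, hk4⟩ := A_loop n (n.toNat + 2) 0 hfuel
  refine ⟨k, ?_, hk3, hk4⟩
  unfold solve
  rw [show (1 : Int) = gF 0 from h1.symm, show (0 : Int) = (Nat.fib (2 * 0) : Int) from h0.symm]
  rw [show ((0 : Nat) : Int) = (Nat.fib (2 * 0) : Int) from by decide] at hk2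
  rw [hk2]

theorem dbl_loop (n : Int) : ∀ (f hi : Nat), 1 ≤ hi → n < gF (hi * 2 ^ f) →
    ∃ h, dblLoop n f hi = h ∧ 1 ≤ h ∧ n < gF h ∧ h ≤ hi * 2 ^ f := by
  intro f
  induction f with
  | zero =>
    intro hi h1 h2
    simp only [pow_zero, mul_one] at h2
    exact ⟨hi, rfl, h1, h2, by simp⟩
  | succ f ih =>
    intro hi h1 h2
    simp only [dblLoop, xk_eq]
    by_cases hg : gF hi ≤ n
    · simp only [hg, if_pos]
      have heq : hi * 2 * 2 ^ f = hi * 2 ^ (f + 1) := by ring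
      obtain ⟨h, hh1, hh2, hh3, hh4⟩ := ih (hi * 2) (by omega) (by rw [heq]; exact h2)
      exact ⟨h, hh1, hh2, hh3, by omega⟩
    · simp only [hg, if_neg, not_false_iff]
      have : 1 ≤ 2 ^ (f + 1) := Nat.one_le_two_pow
      exact ⟨hi, rfl, h1, by omega, by nlinarith⟩

theorem bs_loop (n : Int) : ∀ (f lo hi : Nat), gF lo ≤ n → n < gF hi → lo < hi →
    hi - lo ≤ 2 ^ f →
    ∃ k, bsLoop n f lo hi = k ∧ gF k ≤ n ∧ n < gF (k + 1) := by
  intro f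
  induction f with
  | zero =>
    intro lo hi hlo hhi hlt hgap
    simp only [pow_zero] at hgap
    have : hi = lo + 1 := by omega
    exact ⟨lo, rfl, hlo, by rw [← this]; exact hhi⟩
  | succ f ih =>
    intro lo hi hlo hhi hlt hgap
    simp only [bsLoop]
    by_cases hg : hi - lo > 1
    · simp only [hg, if_pos, xk_eq]
      have hp : 1 ≤ 2 ^ f := Nat.one_le_two_pow
      have hpow : 2 ^ (f + 1) = 2 * 2 ^ f := by ring
      rw [hpow] at hgap
      by_cases hm : gF ((lo + hi) / 2) ≤ n
      · simp only [hm, if_pos]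
        exact ih ((lo + hi) / 2) hi hm hhi (by omega) (by omega)
      · simp only [hm, if_neg, not_false_iff]
        exact ih lo ((lo + hi) / 2) hlo (by omega) (by omega) (by omega)
    · simp only [hg, if_neg, not_false_iff]
      have : hi = lo + 1 := by omega
      exact ⟨lo, rfl, hlo, by rw [← this]; exact hhi⟩

theorem B_char (n : Int) (h2 : 2 ≤ n) :
    ∃ k, solve_alt n = (gF k, n - gF k, (k : Int)) ∧ gF k ≤ n ∧ n < gF (k + 1) := by
  have hfuel : n < gF (1 * 2 ^ (n.toNat + 2)) := by
    have hlt : n.toNat < 2 ^ (n.toNat + 2) := by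
      calc n.toNat < 2 ^ n.toNat := Nat.lt_two_pow_self
        _ ≤ 2 ^ (n.toNat + 2) := Nat.pow_le_pow_right (by omega) (by omega)
    have hge := gF_ge (1 * 2 ^ (n.toNat + 2))
    have hcast : ((1 * 2 ^ (n.toNat + 2) : Nat) : Int) = ((2 ^ (n.toNat + 2) : Nat) : Int) := by
      norm_num
    rw [hcast] at hge
    have h3 : (n.toNat : Int) < ((2 ^ (n.toNat + 2) : Nat) : Int) := by exact_mod_cast hlt
    have hn : n ≤ (n.toNat : Int) := Int.self_le_toNat n
    omega
  obtain ⟨h, hh1, hh2, hh3, hh4⟩ := dbl_loop n (n.toNat + 2) 1 (le_refl 1) hfuel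
  have hg0 : gF 0 = 1 := by decide
  obtain ⟨k, hk1, hk2, hk3⟩ :=
    bs_loop n (n.toNat + 2) 0 h (by omega) hh3 (by omega) (by omega)
  refine ⟨k, ?_, hk2, hk3⟩
  unfold solve_alt
  rw [if_neg (by omega)]
  simp only [hh1, hk1, xk_eq]

-- ===== VERDICT (by name: the statement is the Claim_ definition above) =====
theorem solve_spec : Claim_equal_solve := by
  intro n _
  unfold Spec_solve
  obtain ⟨k1, ha1, ha2, ha3⟩ := A_char n
  by_cases hn : n < 2
  · have hk1 : k1 = 0 := by
      rcases ha3 with h | h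
      · exact h
      · by_contra hne
        have : gF 1 ≤ gF k1 := gF_mono (by omega)
        have hg1 : gF 1 = 2 := by decide
        omega
    rw [ha1, hk1]
    unfold solve_alt
    rw [if_pos hn]
    simp [gF]
  · obtain ⟨k2, hb1, hb2, hb3⟩ := B_char n (by omega)
    have hle1 : gF k1 ≤ n := by
      rcases ha3 with h | h
      · have h0 : gF 0 = 1 := by decide
        rw [h, h0]
        omega
      · exact h
    have hkeq : k1 = k2 := by
      by_contra hne
      rcases Nat.lt_or_ge k1 k2 with h | h
      · have : gF (k1 + 1) ≤ gF k2 := gF_mono (by omega)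
        omega
      · have : gF (k2 + 1) ≤ gF k1 := gF_mono (by omega)
        omega
    rw [ha1, hb1, hkeq]
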